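-- pv_equiv track=rewrite | github.com/jmussamuhindo/GameTheory_Project | test.py | generate_nim_positions
-- ===== SOURCE A (Python) =====
-- def calculate_mex(s):
--     """Calculate the MEX (minimum excludant) of a set of non-negative integers."""
--     mex = 0
--     while mex in s:
--         mex += 1
--     return mex
--
-- def generate_nim_positions(max_position):
--     """Generate Nim positions and their corresponding MEX values up to a certain position."""
--     positions = [set() for _ in range(max_position + 1)]  # Each position has a set of reachable Mex values
--     mex_values = []
--
--     for i in range(max_position + 1):
--         # Calculate reachable positions and their MEX
--         # Create a single set that contains all mex values reachable from current position
--         reachable_positions = set()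
--         for j in range(1, i + 1):
--             if i ^ j <= i:
--                 reachable_positions |= positions[i ^ j]  # Union of sets
--
--         mex = calculate_mex(reachable_positions)
--         positions[i].add(mex)
--         mex_values.append(mex)
--
--     return mex_values
-- ===== SOURCE B (Python) =====
-- def generate_nim_positions(max_position):
--     """Generate Nim positions and their corresponding MEX values up to a certain position."""
--     return [i - (1 << (i.bit_length() - 1)) + 1 if i else 0
--             for i in range(max_position + 1)]
-- ===== Notes on version B (the rewrite author's own statement) =====
-- stated objective: faster
-- what changed: Replaces the O(max^2) game simulation (per-position scan over all moves, set unions and a mex search) with the proved closed form mex(i) = i - 2^floor(log2 i) + 1 (0 at i=0), filled in one pass.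
import Mathlib
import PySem

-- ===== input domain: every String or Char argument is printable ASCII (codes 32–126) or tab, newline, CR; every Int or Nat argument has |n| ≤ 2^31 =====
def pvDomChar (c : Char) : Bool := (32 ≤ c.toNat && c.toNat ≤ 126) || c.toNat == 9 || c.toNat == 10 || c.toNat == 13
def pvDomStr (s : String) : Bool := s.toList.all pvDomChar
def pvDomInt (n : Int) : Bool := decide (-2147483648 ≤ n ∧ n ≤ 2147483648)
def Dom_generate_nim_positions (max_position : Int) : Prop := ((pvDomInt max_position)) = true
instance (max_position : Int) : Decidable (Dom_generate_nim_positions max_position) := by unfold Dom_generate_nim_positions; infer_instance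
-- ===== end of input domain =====

-- B replaces A's O(max^2) per-position game simulation by the proved closed form
-- mex(i) = i - 2^(bit_length(i)-1) + 1 (0 at i = 0), filled in one pass.

-- ===== PORT A =====
-- while mex in s: mex += 1  — ported with fuel s.length + 1, which always suffices:
-- the Python loop increments mex at most |s| times before hitting a value not in s.
def calc_mex_fuel : Nat → Int → PySem.Set Int → Int
  | 0, mex, _ => mex
  | fuel+1, mex, s => if PySem.Set.contains s mex then calc_mex_fuel fuel (mex+1) s else mex

def calculate_mex (s : PySem.Set Int) : Int := calc_mex_fuel (s.length + 1) 0 s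

-- the body of A's outer 'for i in range(max_position + 1)' loop, on state (positions, mex_values)
def nim_step (st : List (PySem.Set Int) × List Int) (i : Int) : List (PySem.Set Int) × List Int :=
  let reachable := (PySem.List.pyRange 1 (i + 1) 1).foldl
    (fun (acc : PySem.Set Int) j =>
      if PySem.Int.bxor i j ≤ i then
        -- positions[i ^ j]: inside the branch the index is in [0, i] ⊆ range, so the default is never used
        PySem.Set.union acc (PySem.List.pyGetD st.1 (PySem.Int.bxor i j) PySem.Set.empty)
      else acc) PySem.Set.empty
  let mex := calculate_mex reachable
  -- positions[i].add(mex); index i is always in range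
  (PySem.List.pySetD st.1 i (PySem.Set.add (PySem.List.pyGetD st.1 i PySem.Set.empty) mex),
   st.2 ++ [mex])

def generate_nim_positions (max_position : Int) : List Int :=
  let positions0 : List (PySem.Set Int) :=
    (PySem.List.pyRange 0 (max_position + 1) 1).map (fun _ => PySem.Set.empty)
  ((PySem.List.pyRange 0 (max_position + 1) 1).foldl nim_step (positions0, [])).2

-- ===== PORT B =====
def generate_nim_positions_alt (max_position : Int) : List Int :=
  (PySem.List.pyRange 0 (max_position + 1) 1).map (fun i =>
    if i ≠ 0 then i - (1 <<< (PySem.Int.bitLength i - 1)) + 1 else 0)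

-- ===== PRECONDITION & SPEC =====
def Spec_generate_nim_positions (max_position : Int) (out : List Int) : Prop := out = generate_nim_positions_alt max_position
instance (max_position : Int) (out : List Int) : Decidable (Spec_generate_nim_positions max_position out) := by unfold Spec_generate_nim_positions; infer_instance

-- ===== CLAIM (what is proved, stated in full; the proofs are below) =====
def Claim_equal_generate_nim_positions : Prop := ∀ (max_position : Int), Dom_generate_nim_positions max_position → Spec_generate_nim_positions max_position (generate_nim_positions max_position)

-- ===== LEMMAS AND PROOFS =====

-- exponent of the top set bit, and the closed-form Grundy value, on Nat
def msbN (k : Nat) : Nat := PySem.Int.bitLength (k : Int) - 1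
def gM (k : Nat) : Int := if k = 0 then 0 else (k : Int) - ((2 ^ msbN k : Nat) : Int) + 1

theorem msbN_bracket (k : Nat) (hk : k ≠ 0) : 2 ^ msbN k ≤ k ∧ k < 2 ^ (msbN k + 1) := by
  have h1 := PySem.Int.two_pow_bitLength_le (k : Int) (by exact_mod_cast hk)
  have h2 := PySem.Int.lt_two_pow_bitLength (k : Int)
  rw [Int.natAbs_natCast] at h1 h2
  have hbl : PySem.Int.bitLength (k : Int) ≠ 0 := by
    intro h0; rw [h0] at h2; simp at h2; omega
  unfold msbN
  constructor
  · exact h1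
  · have : msbN k + 1 = PySem.Int.bitLength (k : Int) := by unfold msbN; omega
    unfold msbN at this; rw [this]; exact h2

theorem msbN_eq (k m : Nat) (h1 : 2 ^ m ≤ k) (h2 : k < 2 ^ (m + 1)) : msbN k = m := by
  have hk : k ≠ 0 := by have : 0 < 2 ^ m := Nat.two_pow_pos m; omega
  obtain ⟨b1, b2⟩ := msbN_bracket k hk
  rcases lt_trichotomy (msbN k) m with h | h | h
  · have : (2:Nat) ^ (msbN k + 1) ≤ 2 ^ m := Nat.pow_le_pow_right (by norm_num) h
    omega
  · exact h
  · have : (2:Nat) ^ (m + 1) ≤ 2 ^ msbN k := Nat.pow_le_pow_right (by norm_num) h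
    omega

theorem two_pow_xor_eq_add (m r : Nat) (h : r < 2 ^ m) : 2 ^ m ^^^ r = 2 ^ m + r := by
  apply Nat.eq_of_testBit_eq
  intro i
  rcases lt_trichotomy i m with hi | hi | hi
  · rw [Nat.testBit_xor, Nat.testBit_two_pow_add_gt hi,
      Nat.testBit_two_pow_of_ne (by omega), Bool.false_xor]
  · subst hi
    rw [Nat.testBit_xor, Nat.testBit_two_pow_add_eq, Nat.testBit_two_pow_self,
      Nat.testBit_lt_two_pow h]
    rfl
  · have hmono : (2:Nat) ^ (m + 1) ≤ 2 ^ i := Nat.pow_le_pow_right (by norm_num) hi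
    have hmsplit : (2:Nat) ^ (m + 1) = 2 ^ m + 2 ^ m := by ring
    rw [Nat.testBit_xor, Nat.testBit_two_pow_of_ne (by omega),
      Nat.testBit_lt_two_pow (show 2 ^ m + r < 2 ^ i by omega),
      Nat.testBit_lt_two_pow (show r < 2 ^ i by omega), Bool.false_xor]

theorem gM_nonneg (k : Nat) : 0 ≤ gM k := by
  unfold gM
  split
  · norm_num
  · rename_i hk
    have := (msbN_bracket k hk).1
    have : ((2 ^ msbN k : Nat) : Int) ≤ (k : Int) := by exact_mod_cast this
    omega

-- the values of valid moves from i are exactly {0, …, gM i - 1}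
theorem key_reach (i : Nat) (x : Int) :
    (∃ k : Nat, (k ≤ i ∧ k ≠ i ∧ i ^^^ k ≤ i) ∧ x = gM k) ↔ 0 ≤ x ∧ x < gM i := by
  by_cases hi : i = 0
  · subst hi
    constructor
    · rintro ⟨k, ⟨hk1, hk2, _⟩, _⟩; omega
    · intro ⟨h1, h2⟩; unfold gM at h2; simp at h2; omega
  · obtain ⟨hm1, hm2⟩ := msbN_bracket i hi
    set m := msbN i with hm
    set r : Nat := i - 2 ^ m with hr
    have hrlt : r < 2 ^ m := by
      have : (2:Nat) ^ (m + 1) = 2 ^ m + 2 ^ m := by ring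
      omega
    have hisum : i = 2 ^ m + r := by omega
    have hgMi : gM i = (r : Int) + 1 := by
      unfold gM; rw [if_neg hi]; rw [← hm]
      have : ((i : Int)) = ((2 ^ m : Nat) : Int) + (r : Nat) := by exact_mod_cast hisum
      omega
    constructor
    · rintro ⟨k, ⟨hk1, hk2, hk3⟩, rfl⟩
      refine ⟨gM_nonneg k, ?_⟩
      rw [hgMi]
      by_cases hk0 : k = 0
      · subst hk0; unfold gM; simp
      · obtain ⟨hp1, hp2⟩ := msbN_bracket k hk0
        set p := msbN k with hp
        set t : Nat := k - 2 ^ p with ht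
        have htlt : t < 2 ^ p := by
          have : (2:Nat) ^ (p + 1) = 2 ^ p + 2 ^ p := by ring
          omega
        have hksum : k = 2 ^ p + t := by omega
        have hgMk : gM k = (t : Int) + 1 := by
          unfold gM; rw [if_neg hk0]; rw [← hp]
          have : ((k : Int)) = ((2 ^ p : Nat) : Int) + (t : Nat) := by exact_mod_cast hksum
          omega
        rw [hgMk]
        -- goal: (t : Int) + 1 < r + 1, i.e. t < r
        suffices hts : t < r by exact_mod_cast (by omega : (t : Int) + 1 < (r : Int) + 1)
        by_contra hge
        push_neg at hge   -- r ≤ t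
        have hpm : p ≤ m := by
          by_contra hgt
          push_neg at hgt
          have : (2:Nat) ^ (m + 1) ≤ 2 ^ p := Nat.pow_le_pow_right (by norm_num) hgt
          omega
        rcases Nat.eq_or_lt_of_le hpm with hpe | hplt
        · -- p = m: k ≤ i and k ≠ i give t < r
          rw [hpe] at hksum
          omega
        · -- p < m
          have hk2m : k < 2 ^ m := by
            have : (2:Nat) ^ (p + 1) ≤ 2 ^ m := Nat.pow_le_pow_right (by norm_num) hplt
            omega
        -- i ^^^ k = 2^m + (r ^^^ k)
          have hrk : r ^^^ k < 2 ^ m := Nat.xor_lt_two_pow hrlt hk2m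
          have hix : i ^^^ k = 2 ^ m + (r ^^^ k) := by
            rw [hisum, ← two_pow_xor_eq_add m r hrlt, Nat.xor_assoc,
              two_pow_xor_eq_add m (r ^^^ k) hrk]
          have hcond : r ^^^ k ≤ r := by omega
          have hr2p : r < 2 ^ p := by omega
          have hrt : r ^^^ t < 2 ^ p := Nat.xor_lt_two_pow hr2p htlt
          have h1 : r ^^^ k = 2 ^ p ^^^ (r ^^^ t) := by
            rw [hksum, ← two_pow_xor_eq_add p t htlt]; ac_rfl
          rw [h1, two_pow_xor_eq_add p (r ^^^ t) hrt] at hcond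
          omega
    · rintro ⟨hx0, hxlt⟩
      rw [hgMi] at hxlt
      by_cases hx : x = 0
      · refine ⟨0, ⟨by omega, by omega, ?_⟩, by simp [gM, hx]⟩
        simp
      · set t : Nat := (x - 1).toNat with htdef
        have hxt : x = (t : Int) + 1 := by omega
        have htr : t < r := by omega
        refine ⟨2 ^ m + t, ⟨by omega, by omega, ?_⟩, ?_⟩
        · have ht2m : t < 2 ^ m := by omega
          have hix : i ^^^ (2 ^ m + t) = r ^^^ t := by
            rw [hisum, ← two_pow_xor_eq_add m r hrlt, ← two_pow_xor_eq_add m t ht2m]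
            have h2 : 2 ^ m ^^^ r ^^^ (2 ^ m ^^^ t) = (2 ^ m ^^^ 2 ^ m) ^^^ (r ^^^ t) := by ac_rfl
            rw [h2, Nat.xor_self, Nat.zero_xor]
          rw [hix]
          have : r ^^^ t < 2 ^ m := Nat.xor_lt_two_pow hrlt (by omega)
          omega
        · have hmk : msbN (2 ^ m + t) = m := by
            apply msbN_eq
            · omega
            · have : (2:Nat) ^ (m + 1) = 2 ^ m + 2 ^ m := by ring
              omega
          unfold gM
          rw [if_neg (by positivity), hmk, hxt]
          push_cast
          omega

-- running the fueled while-loop on a set whose members are exactly {0, …, M-1}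
theorem calc_run (s : PySem.Set Int) (M : Int)
    (hmem : ∀ x : Int, x ∈ s ↔ 0 ≤ x ∧ x < M) :
    ∀ (fuel : Nat) (c : Int), 0 ≤ c → c ≤ M → (M - c).toNat < fuel →
      calc_mex_fuel fuel c s = M := by
  intro fuel
  induction fuel with
  | zero => intro c _ _ h; omega
  | succ f ih =>
    intro c hc0 hcM hfuel
    unfold calc_mex_fuel
    by_cases hceq : c = M
    · have : ¬ (c ∈ s) := by rw [hmem]; omega
      rw [if_neg (by simp [PySem.Set.contains_iff, this])]
      exact hceq
    · have hclt : c < M := by omega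
      have : c ∈ s := by rw [hmem]; omega
      rw [if_pos (by simp [PySem.Set.contains_iff, this])]
      exact ih (c + 1) (by omega) (by omega) (by omega)

theorem mex_of_range (s : PySem.Set Int) (M : Int) (hnd : s.Nodup)
    (hmem : ∀ x : Int, x ∈ s ↔ 0 ≤ x ∧ x < M) (hM : 0 ≤ M) :
    calculate_mex s = M := by
  have hperm : s.Perm (PySem.List.pyRange 0 M 1) := by
    rw [List.perm_ext_iff_of_nodup hnd (PySem.List.nodup_pyRange_one 0 M)]
    intro x
    rw [hmem, PySem.List.mem_pyRange_one]
  have hlen : s.length = M.toNat := by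
    rw [hperm.length_eq, PySem.List.length_pyRange_one]
    omega
  unfold calculate_mex
  exact calc_run s M hmem (s.length + 1) 0 le_rfl hM (by omega)

-- membership and nodup of the inner union-fold
theorem mem_inner_foldl (i : Int) (P : List (PySem.Set Int)) (l : List Int)
    (s0 : PySem.Set Int) (x : Int) :
    x ∈ l.foldl (fun (acc : PySem.Set Int) j =>
        if PySem.Int.bxor i j ≤ i then
          PySem.Set.union acc (PySem.List.pyGetD P (PySem.Int.bxor i j) PySem.Set.empty)
        else acc) s0
    ↔ x ∈ s0 ∨ ∃ j ∈ l, PySem.Int.bxor i j ≤ i ∧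
        x ∈ PySem.List.pyGetD P (PySem.Int.bxor i j) PySem.Set.empty := by
  induction l generalizing s0 with
  | nil => simp
  | cons a t ih =>
    simp only [List.foldl_cons]
    rw [ih]
    by_cases h : PySem.Int.bxor i a ≤ i
    · rw [if_pos h, PySem.Set.mem_union]
      constructor
      · rintro (⟨hx | hx⟩ | ⟨j, hj, hc, hx⟩)
        · exact Or.inl hx
        · exact Or.inr ⟨a, by simp, h, hx⟩
        · exact Or.inr ⟨j, by simp [hj], hc, hx⟩
      · rintro (hx | ⟨j, hj, hc, hx⟩)
        · exact Or.inl (Or.inl hx)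
        · rcases List.mem_cons.mp hj with rfl | hj
          · exact Or.inl (Or.inr hx)
          · exact Or.inr ⟨j, hj, hc, hx⟩
    · rw [if_neg h]
      constructor
      · rintro (hx | ⟨j, hj, hc, hx⟩)
        · exact Or.inl hx
        · exact Or.inr ⟨j, by simp [hj], hc, hx⟩
      · rintro (hx | ⟨j, hj, hc, hx⟩)
        · exact Or.inl hx
        · rcases List.mem_cons.mp hj with rfl | hj
          · exact absurd hc h
          · exact Or.inr ⟨j, hj, hc, hx⟩

theorem nodup_inner_foldl (i : Int) (P : List (PySem.Set Int)) (l : List Int)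
    (s0 : PySem.Set Int) (h : s0.Nodup) :
    (l.foldl (fun (acc : PySem.Set Int) j =>
        if PySem.Int.bxor i j ≤ i then
          PySem.Set.union acc (PySem.List.pyGetD P (PySem.Int.bxor i j) PySem.Set.empty)
        else acc) s0).Nodup := by
  induction l generalizing s0 with
  | nil => exact h
  | cons a t ih =>
    simp only [List.foldl_cons]
    apply ih
    split
    · exact PySem.Set.nodup_union _ _ h
    · exact h

-- the positions list after c outer iterations
def posAfter (N c : Nat) : List (PySem.Set Int) :=
  (List.range N).map (fun k => if k < c then [gM k] else [])

theorem posAfter_getD (N c k : Nat) (hk : k < N) :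
    PySem.List.pyGetD (posAfter N c) (k : Int) PySem.Set.empty
      = if k < c then [gM k] else [] := by
  rw [PySem.List.pyGetD_natCast]
  exact PySem.List.getD_map_range _ N k _ hk

theorem posAfter_set (N c : Nat) (hc : c < N) :
    (posAfter N c).set c [gM c] = posAfter N (c + 1) := by
  unfold posAfter
  apply List.ext_getElem
  · simp
  · intro n h1 h2
    simp only [List.length_set, List.length_map, List.length_range] at h1 h2
    rw [List.getElem_set]
    by_cases hn : c = n
    · subst hn
      rw [if_pos rfl]
      simp only [List.getElem_map, List.getElem_range]
      rw [if_pos (by omega)]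
    · rw [if_neg hn]
      simp only [List.getElem_map, List.getElem_range]
      by_cases h : n < c
      · rw [if_pos h, if_pos (by omega)]
      · rw [if_neg h, if_neg (by omega)]

-- one outer iteration
theorem step_eq (N c : Nat) (hc : c < N) (vs : List Int) :
    nim_step (posAfter N c, vs) (c : Int) = (posAfter N (c + 1), vs ++ [gM c]) := by
  unfold nim_step
  simp only
  set P := posAfter N c with hP
  set reach := (PySem.List.pyRange 1 ((c : Int) + 1) 1).foldl
    (fun (acc : PySem.Set Int) j =>
      if PySem.Int.bxor (c : Int) j ≤ (c : Int) then
        PySem.Set.union acc (PySem.List.pyGetD P (PySem.Int.bxor (c : Int) j) PySem.Set.empty)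
      else acc) PySem.Set.empty with hreach
  have hmem : ∀ x : Int, x ∈ reach ↔ 0 ≤ x ∧ x < gM c := by
    intro x
    rw [hreach, mem_inner_foldl]
    rw [← key_reach c x]
    constructor
    · rintro (hx | ⟨j, hj, hcond, hx⟩)
      · simp [PySem.Set.empty] at hx
      · rw [PySem.List.mem_pyRange_one] at hj
        obtain ⟨hj1, hj2⟩ := hj
        set jn : Nat := j.toNat with hjn
        have hjcast : j = (jn : Int) := by omega
        rw [hjcast, PySem.Int.bxor_natCast] at hcond hx
        have hxle : c ^^^ jn ≤ c := by exact_mod_cast hcond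
        rw [posAfter_getD N c _ (by omega)] at hx
        have hxlt : c ^^^ jn < c := by
          rcases Nat.lt_or_ge (c ^^^ jn) c with h | h
          · exact h
          · have heq : c ^^^ jn = c := by omega
            have h0 : c ^^^ (c ^^^ jn) = c ^^^ c := by rw [heq]
            rw [← Nat.xor_assoc, Nat.xor_self, Nat.zero_xor] at h0
            omega
        rw [if_pos hxlt] at hx
        simp at hx
        refine ⟨c ^^^ jn, ⟨by omega, by omega, ?_⟩, hx⟩
        rw [← Nat.xor_assoc, Nat.xor_self, Nat.zero_xor]
        omega
    · rintro ⟨k, ⟨hk1, hk2, hk3⟩, hx⟩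
      right
      have hkc : k < c := by omega
      refine ⟨((c ^^^ k : Nat) : Int), ?_, ?_, ?_⟩
      · rw [PySem.List.mem_pyRange_one]
        have : c ^^^ k ≠ 0 := fun h => hk2 (Nat.eq_of_xor_eq_zero h).symm
        constructor
        · exact_mod_cast Nat.one_le_iff_ne_zero.mpr this
        · exact_mod_cast (by omega : c ^^^ k < c + 1)
      · rw [PySem.Int.bxor_natCast, ← Nat.xor_assoc, Nat.xor_self, Nat.zero_xor]
        exact_mod_cast hk1
      · rw [PySem.Int.bxor_natCast, ← Nat.xor_assoc, Nat.xor_self, Nat.zero_xor,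
          posAfter_getD N c k (by omega), if_pos hkc]
        simp [hx]
  have hnd : reach.Nodup := by
    rw [hreach]
    exact nodup_inner_foldl _ _ _ _ List.nodup_nil
  have hmex : calculate_mex reach = gM c := mex_of_range reach (gM c) hnd hmem (gM_nonneg c)
  rw [hmex]
  rw [hP, posAfter_getD N c c (by omega), if_neg (by omega)]
  have hadd : PySem.Set.add ([] : PySem.Set Int) (gM c) = [gM c] := by
    simp [PySem.Set.add]
  rw [hadd, PySem.List.pySetD_natCast, posAfter_set N c hc]

-- the outer loop invariant
theorem loop_inv (N : Nat) : ∀ c : Nat, c ≤ N →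
    (PySem.List.pyRange 0 (c : Int) 1).foldl nim_step (posAfter N 0, [])
      = (posAfter N c, (List.range c).map gM) := by
  intro c
  induction c with
  | zero =>
    intro _
    rw [PySem.List.pyRange_one_eq_nil (by omega)]
    simp
  | succ c ih =>
    intro hc
    have h1 : ((c + 1 : Nat) : Int) = (c : Int) + 1 := by push_cast; ring
    rw [h1, PySem.List.pyRange_one_succ_right (by omega), List.foldl_append,
      ih (by omega)]
    simp only [List.foldl_cons, List.foldl_nil]
    rw [step_eq N c (by omega), List.range_succ, List.map_append]
    rfl

-- ===== VERDICT (by name: the statement is the Claim_ definition above) =====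
theorem generate_nim_positions_spec : Claim_equal_generate_nim_positions := by
  intro max_position _
  unfold Spec_generate_nim_positions generate_nim_positions generate_nim_positions_alt
  by_cases hneg : max_position + 1 ≤ 0
  · rw [PySem.List.pyRange_one_eq_nil hneg]
    simp
  · push_neg at hneg
    set N : Nat := (max_position + 1).toNat with hN
    have hcast : ((N : Int)) = max_position + 1 := by omega
    rw [← hcast, PySem.List.pyRange_zero_nat]
    have hinit : ((List.range N).map (fun k : Nat => (k : Int))).map
        (fun _ => (PySem.Set.empty : PySem.Set Int)) = posAfter N 0 := by
      unfold posAfter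
      rw [List.map_map]
      apply List.map_congr_left
      intro k _
      simp [PySem.Set.empty]
    have hfold : ((List.range N).map (fun k : Nat => (k : Int))).foldl nim_step
        (posAfter N 0, []) = (posAfter N N, (List.range N).map gM) := by
      have := loop_inv N N le_rfl
      rw [PySem.List.pyRange_zero_nat] at this
      exact this
    simp only [hinit, hfold, List.map_map]
    apply List.map_congr_left
    intro k _
    simp only [Function.comp]
    by_cases hk : k = 0
    · subst hk
      simp [gM]
    · rw [if_pos (by exact_mod_cast hk)]
      unfold gM msbN
      rw [if_neg hk]
      rw [Nat.shiftLeft_eq, one_mul]
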